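-- pv_equiv track=rewrite | github.com/nammarsipan/IN1000 | exam2020.py | sjekk_om_fyord
-- ===== SOURCE A (Python) =====
-- def sjekk_om_fyord(setning, fyord, synonym_liste):
--
--     synonymer = []
--     for synonymGruppe in synonym_liste:
--         if fyord in synonymGruppe:
--             for synonym in synonymGruppe:
--                 synonymer.append(synonym)
--
--     setningListe = setning.strip().split()
--     for ord in setningListe:
--         if ord in synonymer:
--             return True
--
--     return False
-- ===== SOURCE B (Python) =====
-- def sjekk_om_fyord(setning, fyord, synonym_liste):
--     ordmengde = set(setning.strip().split())
--     for gruppe in synonym_liste: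
--         if fyord in gruppe and ordmengde & set(gruppe):
--             return True
--     return False
-- ===== Notes on version B (the rewrite author's own statement) =====
-- stated objective: simpler
-- what changed: B drops A's flat 'synonymer' accumulator and its second scan over the sentence words: it builds the sentence-word set once and returns True on the first synonym group that both contains fyord and intersects that set.
import Mathlib
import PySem

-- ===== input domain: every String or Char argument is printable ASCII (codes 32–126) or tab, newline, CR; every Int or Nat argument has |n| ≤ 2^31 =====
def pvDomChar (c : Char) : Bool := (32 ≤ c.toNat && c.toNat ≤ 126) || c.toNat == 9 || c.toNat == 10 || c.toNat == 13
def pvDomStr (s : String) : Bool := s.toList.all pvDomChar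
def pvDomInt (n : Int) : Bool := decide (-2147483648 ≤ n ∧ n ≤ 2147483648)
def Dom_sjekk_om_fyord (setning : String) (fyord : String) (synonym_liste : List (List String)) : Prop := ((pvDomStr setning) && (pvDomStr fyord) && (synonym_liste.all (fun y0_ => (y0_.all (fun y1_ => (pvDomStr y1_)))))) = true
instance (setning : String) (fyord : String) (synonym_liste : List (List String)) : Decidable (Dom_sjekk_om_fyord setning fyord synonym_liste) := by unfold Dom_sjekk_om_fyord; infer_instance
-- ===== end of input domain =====

-- B replaces A's flat 'synonymer' accumulator + second scan over sentence words by one pass over the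
-- groups, testing each fyord-containing group for intersection with the sentence-word set (objective: simpler).

-- ===== PORT A =====
-- the second loop of A: 'for ord in setningListe: if ord in synonymer: return True' then 'return False'
def pvA_scan (setningListe : List String) (synonymer : List String) : Bool :=
  match setningListe with
  | [] => false
  | w :: rest => if w ∈ synonymer then true else pvA_scan rest synonymer

def sjekk_om_fyord (setning : String) (fyord : String) (synonym_liste : List (List String)) : Bool :=
  let synonymer := synonym_liste.foldl
    (fun acc synonymGruppe =>
      if fyord ∈ synonymGruppe then
        synonymGruppe.foldl (fun a synonym => a ++ [synonym]) acc
      else acc) []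
  let setningListe := PySem.Str.split₀ (PySem.Str.strip setning)
  pvA_scan setningListe synonymer

-- ===== PORT B =====
-- B's single loop: return True on the first group containing fyord whose intersection with the
-- sentence-word set is nonempty (Python truthiness of 'ordmengde & set(gruppe)').
def pvB_scan (ordmengde : PySem.Set String) (fyord : String) (grupper : List (List String)) : Bool :=
  match grupper with
  | [] => false
  | gruppe :: rest =>
    if fyord ∈ gruppe ∧ (PySem.Set.inter ordmengde (PySem.Set.ofList gruppe)) ≠ [] then true
    else pvB_scan ordmengde fyord rest

def sjekk_om_fyord_alt (setning : String) (fyord : String) (synonym_liste : List (List String)) : Bool :=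
  let ordmengde := PySem.Set.ofList (PySem.Str.split₀ (PySem.Str.strip setning))
  pvB_scan ordmengde fyord synonym_liste

-- ===== PRECONDITION & SPEC =====
def Spec_sjekk_om_fyord (setning : String) (fyord : String) (synonym_liste : List (List String)) (out : Bool) : Prop := out = sjekk_om_fyord_alt setning fyord synonym_liste
instance (setning : String) (fyord : String) (synonym_liste : List (List String)) (out : Bool) : Decidable (Spec_sjekk_om_fyord setning fyord synonym_liste out) := by unfold Spec_sjekk_om_fyord; infer_instance

-- ===== CLAIM (what is proved, stated in full; the proofs are below) =====
def Claim_equal_sjekk_om_fyord : Prop := ∀ (setning : String) (fyord : String) (synonym_liste : List (List String)), Dom_sjekk_om_fyord setning fyord synonym_liste → Spec_sjekk_om_fyord setning fyord synonym_liste (sjekk_om_fyord setning fyord synonym_liste)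

-- ===== LEMMAS AND PROOFS =====

theorem pv_foldl_app {α : Type} (g acc : List α) :
    g.foldl (fun a s => a ++ [s]) acc = acc ++ g := by
  induction g generalizing acc with
  | nil => simp
  | cons x xs ih => simp [List.foldl, ih]

theorem pvA_synonymer_mem (fyord : String) (L : List (List String)) (acc : List String) (x : String) :
    x ∈ L.foldl (fun acc g => if fyord ∈ g then g.foldl (fun a s => a ++ [s]) acc else acc) acc ↔
      x ∈ acc ∨ ∃ g ∈ L, fyord ∈ g ∧ x ∈ g := by
  induction L generalizing acc with
  | nil => simp
  | cons g rest ih =>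
    simp only [List.foldl]
    rcases Decidable.em (fyord ∈ g) with h | h
    · rw [if_pos h, pv_foldl_app, ih]
      simp only [List.mem_append, List.mem_cons]
      constructor
      · rintro ((hx | hx) | ⟨g', hg', p⟩)
        · exact Or.inl hx
        · exact Or.inr ⟨g, Or.inl rfl, h, hx⟩
        · exact Or.inr ⟨g', Or.inr hg', p⟩
      · rintro (hx | ⟨g', (rfl | hg'), hfy, hx⟩)
        · exact Or.inl (Or.inl hx)
        · exact Or.inl (Or.inr hx)
        · exact Or.inr ⟨g', hg', hfy, hx⟩
    · rw [if_neg h, ih]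
      simp only [List.mem_cons]
      constructor
      · rintro (hx | ⟨g', hg', p⟩)
        · exact Or.inl hx
        · exact Or.inr ⟨g', Or.inr hg', p⟩
      · rintro (hx | ⟨g', (rfl | hg'), hfy, hx⟩)
        · exact Or.inl hx
        · exact absurd hfy h
        · exact Or.inr ⟨g', hg', hfy, hx⟩

theorem pvA_scan_iff (ws syn : List String) :
    pvA_scan ws syn = true ↔ ∃ w ∈ ws, w ∈ syn := by
  induction ws with
  | nil => simp [pvA_scan]
  | cons w rest ih =>
    by_cases h : w ∈ syn
    · simp [pvA_scan, h]
    · simp [pvA_scan, h, ih]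

theorem pvB_scan_iff (s : PySem.Set String) (fy : String) (L : List (List String)) :
    pvB_scan s fy L = true ↔ ∃ g ∈ L, fy ∈ g ∧ ∃ w ∈ s, w ∈ g := by
  induction L with
  | nil => simp [pvB_scan]
  | cons g rest ih =>
    by_cases h : fy ∈ g ∧ (PySem.Set.inter s (PySem.Set.ofList g)) ≠ []
    · simp only [pvB_scan, if_pos h]
      obtain ⟨hfy, hne⟩ := h
      rcases List.exists_mem_of_ne_nil _ hne with ⟨w, hw⟩
      rw [PySem.Set.mem_inter] at hw
      simp only [true_iff]
      exact ⟨g, List.mem_cons_self .., hfy, w, hw.1, (PySem.Set.mem_ofList _ _).1 hw.2⟩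
    · simp only [pvB_scan, if_neg h, ih]
      constructor
      · rintro ⟨g', hg', hx⟩; exact ⟨g', List.mem_cons_of_mem _ hg', hx⟩
      · rintro ⟨g', hg', hfy, w, hws, hwg⟩
        rcases List.mem_cons.1 hg' with rfl | hg'
        · exfalso; apply h
          refine ⟨hfy, ?_⟩
          intro hnil
          have : w ∈ PySem.Set.inter s (PySem.Set.ofList g') := by
            rw [PySem.Set.mem_inter]
            exact ⟨hws, (PySem.Set.mem_ofList _ _).2 hwg⟩
          simp [hnil] at this
        · exact ⟨g', hg', hfy, w, hws, hwg⟩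

-- ===== VERDICT (by name: the statement is the Claim_ definition above) =====
theorem sjekk_om_fyord_spec : Claim_equal_sjekk_om_fyord := by
  intro setning fyord synonym_liste _
  show sjekk_om_fyord setning fyord synonym_liste = sjekk_om_fyord_alt setning fyord synonym_liste
  unfold sjekk_om_fyord sjekk_om_fyord_alt
  rw [Bool.eq_iff_iff, pvA_scan_iff, pvB_scan_iff]
  constructor
  · rintro ⟨w, hw, hsyn⟩
    rcases (pvA_synonymer_mem _ _ _ _).1 hsyn with h | ⟨g, hg, hfy, hwg⟩
    · simp at h
    · exact ⟨g, hg, hfy, w, (PySem.Set.mem_ofList _ _).2 hw, hwg⟩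
  · rintro ⟨g, hg, hfy, w, hws, hwg⟩
    exact ⟨w, (PySem.Set.mem_ofList _ _).1 hws, (pvA_synonymer_mem _ _ _ _).2 (Or.inr ⟨g, hg, hfy, hwg⟩)⟩
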